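-- pv_equiv track=rewrite | github.com/alex2awesome/public-comment-webpage | scripts/scraping/get_regulations.py | guess_regs_docket_from_pi_numbers
-- ===== SOURCE A (Python) =====
-- from typing import Optional, Dict, Any, List, Tuple
--
-- def guess_regs_docket_from_pi_numbers(dnums: Optional[List[str]]) -> Optional[str]:
--     if not dnums:
--         return None
--     # First pass: obvious agency patterns
--     for d in dnums:
--         if "-" in d and any(tag in d for tag in ("-HQ-", "-OSHA-", "-FDA-", "-CFPB-", "-CMS-", "-APHIS-", "-FWS-", "-FERC-", "-EPA-")):
--             return d
--     # Next: generic ABC-YYYY-NNNN form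
--     for d in dnums:
--         parts = d.split("-")
--         if len(parts) >= 3 and parts[0].isalpha():
--             return d
--     return None
-- ===== SOURCE B (Python) =====
-- def guess_regs_docket_from_pi_numbers(dnums):
--     if not dnums:
--         return None
--     tags = ("-HQ-", "-OSHA-", "-FDA-", "-CFPB-", "-CMS-", "-APHIS-", "-FWS-", "-FERC-", "-EPA-")
--
--     def rank(d):
--         if "-" in d and any(t in d for t in tags):
--             return 0
--         parts = d.split("-")
--         if len(parts) >= 3 and parts[0].isalpha():
--             return 1
--         return 2
--
--     best = None  # (rank, docket) with the smallest rank seen, earliest wins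
--     for d in dnums:
--         r = rank(d)
--         if r < 2 and (best is None or r < best[0]):
--             best = (r, d)
--     return best[1] if best is not None else None
-- ===== Notes on version B (the rewrite author's own statement) =====
-- stated objective: alternative
-- what changed: Replaced A's two staged scans with early returns by a rank function (0 = agency pattern, 1 = generic ABC-YYYY-NNNN, 2 = neither) and a single full pass that keeps the earliest element of minimal rank, returned after the loop.
import Mathlib
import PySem

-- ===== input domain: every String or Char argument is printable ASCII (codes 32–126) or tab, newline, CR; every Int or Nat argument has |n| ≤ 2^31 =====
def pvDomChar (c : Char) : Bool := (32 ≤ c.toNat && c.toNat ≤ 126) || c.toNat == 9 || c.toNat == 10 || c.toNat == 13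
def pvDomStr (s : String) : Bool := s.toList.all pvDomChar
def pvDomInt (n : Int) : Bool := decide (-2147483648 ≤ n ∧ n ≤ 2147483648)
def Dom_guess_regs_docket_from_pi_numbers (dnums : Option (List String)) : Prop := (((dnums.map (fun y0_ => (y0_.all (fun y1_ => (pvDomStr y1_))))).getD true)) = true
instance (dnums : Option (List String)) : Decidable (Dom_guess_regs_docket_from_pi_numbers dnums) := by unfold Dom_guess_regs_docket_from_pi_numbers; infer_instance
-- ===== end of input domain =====

-- B replaces A's two staged early-return scans by a rank classification (0 agency, 1 generic, 2 neither) and one full pass keeping the earliest minimal-rank element (alternative decomposition, no speed claim).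


-- ===== PORT A =====
def pvTags : List String := ["-HQ-", "-OSHA-", "-FDA-", "-CFPB-", "-CMS-", "-APHIS-", "-FWS-", "-FERC-", "-EPA-"]

-- A's first loop: return the first d with an agency pattern
def pvA_pass1 : List String → Option String
  | [] => none
  | d :: rest =>
      if PySem.Str.isIn "-" d && pvTags.any (fun tag => PySem.Str.isIn tag d) then some d
      else pvA_pass1 rest

-- A's second loop: return the first d of generic ABC-YYYY-NNNN form
def pvA_pass2 : List String → Option String
  | [] => none
  | d :: rest =>
      let parts := (PySem.Str.split? d "-").getD []
      if decide (3 ≤ parts.length) && PySem.Str.strIsalpha (parts.headD "") then some d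
      else pvA_pass2 rest

def guess_regs_docket_from_pi_numbers (dnums : Option (List String)) : Option String :=
  match dnums with
  | none => none
  | some l =>
      if l.isEmpty then none
      else
        match pvA_pass1 l with
        | some d => some d
        | none => pvA_pass2 l

-- ===== PORT B =====
-- B's rank: 0 = agency pattern, 1 = generic ABC-YYYY-NNNN, 2 = neither
def pvRank (d : String) : Nat :=
  if PySem.Str.isIn "-" d && pvTags.any (fun t => PySem.Str.isIn t d) then 0
  else
    let parts := (PySem.Str.split? d "-").getD []
    if decide (3 ≤ parts.length) && PySem.Str.strIsalpha (parts.headD "") then 1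
    else 2

-- B's loop body: keep the earliest element of minimal rank < 2
def pvStep (best : Option (Nat × String)) (d : String) : Option (Nat × String) :=
  let r := pvRank d
  if r < 2 then
    match best with
    | none => some (r, d)
    | some (br, bd) => if r < br then some (r, d) else some (br, bd)
  else best

def guess_regs_docket_from_pi_numbers_alt (dnums : Option (List String)) : Option String :=
  match dnums with
  | none => none
  | some l =>
      if l.isEmpty then none
      else
        match l.foldl pvStep none with
        | some (_, d) => some d
        | none => none

-- ===== PRECONDITION & SPEC =====
def Spec_guess_regs_docket_from_pi_numbers (dnums : Option (List String)) (out : Option String) : Prop := out = guess_regs_docket_from_pi_numbers_alt dnums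
instance (dnums : Option (List String)) (out : Option String) : Decidable (Spec_guess_regs_docket_from_pi_numbers dnums out) := by unfold Spec_guess_regs_docket_from_pi_numbers; infer_instance

-- ===== CLAIM (what is proved, stated in full; the proofs are below) =====
def Claim_equal_guess_regs_docket_from_pi_numbers : Prop := ∀ (dnums : Option (List String)), Dom_guess_regs_docket_from_pi_numbers dnums → Spec_guess_regs_docket_from_pi_numbers dnums (guess_regs_docket_from_pi_numbers dnums)

-- ===== LEMMAS AND PROOFS =====
-- an accumulator of rank 0 is never replaced
theorem pvFold_acc0 (l : List String) (d : String) :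
    l.foldl pvStep (some (0, d)) = some (0, d) := by
  induction l generalizing d with
  | nil => rfl
  | cons x rest ih =>
      simp only [List.foldl, pvStep]
      split
      · simp only [Nat.not_lt_zero, if_false]; exact ih d
      · exact ih d

-- an accumulator of rank 1 survives unless a rank-0 (agency) element appears later
theorem pvFold_acc1 (l : List String) (d : String) :
    l.foldl pvStep (some (1, d)) =
      match pvA_pass1 l with
      | some a => some (0, a)
      | none => some (1, d) := by
  induction l generalizing d with
  | nil => rfl
  | cons x rest ih =>
      by_cases h0 : (PySem.Str.isIn "-" x && pvTags.any (fun t => PySem.Str.isIn t x)) = true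
      · have hr : pvRank x = 0 := by simp only [pvRank, h0, if_true]
        simp only [List.foldl, pvStep, hr, pvA_pass1, if_pos h0]
        simp [pvFold_acc0]
      · have h0' := Bool.eq_false_iff.mpr h0
        have hr1 : pvRank x ≠ 0 := by
          simp only [pvRank, h0', Bool.false_eq_true, if_false]; split <;> simp
        simp only [List.foldl, pvStep, pvA_pass1, if_neg h0]
        have : (if pvRank x < 2 then
                  if pvRank x < 1 then some (pvRank x, x) else some (1, d)
                else some (1, d)) = some (1, d) := by
          split
          · rw [if_neg]; omega
          · rfl
        rw [this]
        exact ih d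

-- starting from none, the fold computes exactly A's staged result
theorem pvFold_none (l : List String) :
    l.foldl pvStep none =
      match pvA_pass1 l with
      | some a => some (0, a)
      | none =>
        match pvA_pass2 l with
        | some g => some (1, g)
        | none => none := by
  induction l with
  | nil => rfl
  | cons x rest ih =>
      by_cases h0 : (PySem.Str.isIn "-" x && pvTags.any (fun t => PySem.Str.isIn t x)) = true
      · have hr : pvRank x = 0 := by simp only [pvRank, h0, if_true]
        simp only [List.foldl, pvStep, hr, pvA_pass1, if_pos h0]
        simp [pvFold_acc0]
      · have h0' := Bool.eq_false_iff.mpr h0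
        by_cases h1 : (decide (3 ≤ ((PySem.Str.split? x "-").getD []).length) &&
            PySem.Str.strIsalpha (((PySem.Str.split? x "-").getD []).headD "")) = true
        · have hr : pvRank x = 1 := by simp only [pvRank, h0', Bool.false_eq_true, if_false, h1, if_true]
          simp only [List.foldl, pvStep, hr, pvA_pass1, pvA_pass2, if_neg h0, if_pos h1]
          simp [pvFold_acc1]
        · have h1' := Bool.eq_false_iff.mpr h1
          have hr : pvRank x = 2 := by simp only [pvRank, h0', h1', Bool.false_eq_true, if_false]
          simp only [List.foldl, pvStep, hr, pvA_pass1, pvA_pass2, if_neg h0, if_neg h1]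
          simpa using ih

-- ===== VERDICT (by name: the statement is the Claim_ definition above) =====
theorem guess_regs_docket_from_pi_numbers_spec : Claim_equal_guess_regs_docket_from_pi_numbers := by
  intro dnums _
  unfold Spec_guess_regs_docket_from_pi_numbers guess_regs_docket_from_pi_numbers guess_regs_docket_from_pi_numbers_alt
  cases dnums with
  | none => rfl
  | some l =>
      by_cases he : l.isEmpty
      · simp [he]
      · simp only [he, Bool.false_eq_true, if_false, pvFold_none]
        cases h1 : pvA_pass1 l
        · cases h2 : pvA_pass2 l <;> simp
        · simp
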